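-- pv_equiv track=rewrite | github.com/Sami-ul/HackUTD-2025 | HackUTD-1/hackutd-1/scripts/parse_live_transcript.py | parse_transcript_with_speakers
-- ===== SOURCE A (Python) =====
-- from typing import Dict, List, Tuple
--
-- def parse_transcript_with_speakers(transcript_text: str) -> Dict[str, str]:
--     """
--     Parse a transcript that has speaker labels like:
--     "customer I'm frustrated with the service
--      agent I understand your frustration..."
--     or
--     "Customer: I'm frustrated with the service
--      Agent: I understand your frustration..."
--
--     Supports both formats:
--     - "customer" or "Customer:" followed by text
--     - "agent" or "Agent:" followed by text
--
--     Returns: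
--         Dictionary with 'customer_text' and 'agent_text' separated
--     """
--     customer_parts = []
--     agent_parts = []
--
--     # Split by lines
--     lines = transcript_text.split('\n')
--
--     current_speaker = None
--     current_text = []
--
--     for line in lines:
--         line = line.strip()
--         if not line:
--             continue
--
--         line_lower = line.lower()
--
--         # Check for speaker labels - support both "customer" and "customer:" formats
--         if line_lower.startswith('customer:') or (line_lower.startswith('customer ') and len(line) > 8):
--             # Save previous speaker's text
--             if current_speaker == 'agent' and current_text:
--                 agent_parts.append(' '.join(current_text))
--             elif current_speaker == 'customer' and current_text:
--                 customer_parts.append(' '.join(current_text))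
--
--             # Start new customer text
--             current_speaker = 'customer'
--             # Remove "customer:" or "customer " prefix
--             if ':' in line[:15]:
--                 text = line.split(':', 1)[1].strip()
--             else:
--                 text = line[8:].strip()  # Remove "customer "
--             current_text = [text] if text else []
--
--         elif line_lower.startswith('agent:') or (line_lower.startswith('agent ') and len(line) > 5):
--             # Save previous speaker's text
--             if current_speaker == 'customer' and current_text:
--                 customer_parts.append(' '.join(current_text))
--             elif current_speaker == 'agent' and current_text:
--                 agent_parts.append(' '.join(current_text))
--
--             # Start new agent text
--             current_speaker = 'agent'
--             # Remove "agent:" or "agent " prefix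
--             if ':' in line[:10]:
--                 text = line.split(':', 1)[1].strip()
--             else:
--                 text = line[5:].strip()  # Remove "agent "
--             current_text = [text] if text else []
--
--         else:
--             # Continuation of current speaker's text
--             if current_speaker:
--                 current_text.append(line)
--             else:
--                 # No speaker label yet - assume it's customer text
--                 current_speaker = 'customer'
--                 current_text = [line]
--
--     # Save last speaker's text
--     if current_speaker == 'customer' and current_text:
--         customer_parts.append(' '.join(current_text))
--     elif current_speaker == 'agent' and current_text:
--         agent_parts.append(' '.join(current_text))
--
--     return {
--         'customer_text': ' '.join(customer_parts).strip(),
--         'agent_text': ' '.join(agent_parts).strip()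
--     }
-- ===== SOURCE B (Python) =====
-- def parse_transcript_with_speakers(transcript_text: str):
--     """Single-state rewrite: keep two flat token lists instead of buffering
--     segments and flushing on speaker changes."""
--     customer_tokens = []
--     agent_tokens = []
--     speaker = None
--
--     for raw in transcript_text.split('\n'):
--         line = raw.strip()
--         if not line:
--             continue
--         low = line.lower()
--         if low.startswith('customer:') or (low.startswith('customer ') and len(line) > 8):
--             speaker = 'customer'
--             text = line.split(':', 1)[1].strip() if ':' in line[:15] else line[8:].strip()
--             if text:
--                 customer_tokens.append(text)
--         elif low.startswith('agent:') or (low.startswith('agent ') and len(line) > 5):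
--             speaker = 'agent'
--             text = line.split(':', 1)[1].strip() if ':' in line[:10] else line[5:].strip()
--             if text:
--                 agent_tokens.append(text)
--         elif speaker == 'agent':
--             agent_tokens.append(line)
--         else:
--             speaker = 'customer'
--             customer_tokens.append(line)
--
--     return {
--         'customer_text': ' '.join(customer_tokens).strip(),
--         'agent_text': ' '.join(agent_tokens).strip()
--     }
-- ===== Notes on version B (the rewrite author's own statement) =====
-- stated objective: simpler
-- what changed: Replaces A's buffer-current_text-and-flush-on-speaker-change accumulation (with a final flush and a nested join of joined segments) by two flat token lists appended to directly, joined once at the end.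
import Mathlib
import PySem

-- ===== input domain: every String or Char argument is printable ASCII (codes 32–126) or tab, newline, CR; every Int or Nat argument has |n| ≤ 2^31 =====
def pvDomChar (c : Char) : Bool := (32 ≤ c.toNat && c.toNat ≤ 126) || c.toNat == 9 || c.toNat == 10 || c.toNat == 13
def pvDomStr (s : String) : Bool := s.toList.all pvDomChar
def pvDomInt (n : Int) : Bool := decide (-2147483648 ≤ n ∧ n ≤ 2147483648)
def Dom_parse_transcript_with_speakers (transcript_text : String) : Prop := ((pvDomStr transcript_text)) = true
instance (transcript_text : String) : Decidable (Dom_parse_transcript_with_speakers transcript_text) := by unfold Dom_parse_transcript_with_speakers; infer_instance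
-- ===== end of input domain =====

-- B replaces A's buffer-and-flush-on-speaker-change accumulation by two flat token
-- lists written to directly (simpler decomposition, same return value).

-- ===== PORT A =====
-- shared transliterations of the label tests and prefix-stripping expressions,
-- which are character-for-character the same in both Pythons
def pvIsCust (line line_lower : String) : Bool :=
  PySem.Str.startswith line_lower "customer:" ||
    (PySem.Str.startswith line_lower "customer " && decide (8 < PySem.Str.len line))

def pvIsAgent (line line_lower : String) : Bool :=
  PySem.Str.startswith line_lower "agent:" ||
    (PySem.Str.startswith line_lower "agent " && decide (5 < PySem.Str.len line))

-- "line.split(':', 1)[1].strip() if ':' in line[:15] else line[8:].strip()"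
-- (the [1] index always exists under the guard; getD "" is the total rendering)
def pvCustText (line : String) : String :=
  if PySem.Str.isIn ":" (PySem.Str.slice line none (some 15)) then
    PySem.Str.strip (((PySem.Str.splitMax? line ":" 1).getD []).getD 1 "")
  else
    PySem.Str.strip (PySem.Str.slice line (some 8) none)

def pvAgentText (line : String) : String :=
  if PySem.Str.isIn ":" (PySem.Str.slice line none (some 10)) then
    PySem.Str.strip (((PySem.Str.splitMax? line ":" 1).getD []).getD 1 "")
  else
    PySem.Str.strip (PySem.Str.slice line (some 5) none)

-- A's loop body: state = (customer_parts, agent_parts, current_speaker, current_text);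
-- the flush arms write to disjoint components, so the if/elif pair is rendered as the
-- two independent conditional updates below
def pvStepA (st : List String × List String × Option String × List String) (rawLine : String) :
    List String × List String × Option String × List String :=
  match st with
  | (customer_parts, agent_parts, current_speaker, current_text) =>
    let line := PySem.Str.strip rawLine
    if line = "" then (customer_parts, agent_parts, current_speaker, current_text)
    else
      let line_lower := PySem.Str.lower line
      if pvIsCust line line_lower then
        (if current_speaker = some "customer" ∧ current_text ≠ [] then
            customer_parts ++ [PySem.Str.join " " current_text] else customer_parts,
         if current_speaker = some "agent" ∧ current_text ≠ [] then
            agent_parts ++ [PySem.Str.join " " current_text] else agent_parts,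
         some "customer",
         if pvCustText line ≠ "" then [pvCustText line] else [])
      else if pvIsAgent line line_lower then
        (if current_speaker = some "customer" ∧ current_text ≠ [] then
            customer_parts ++ [PySem.Str.join " " current_text] else customer_parts,
         if current_speaker = some "agent" ∧ current_text ≠ [] then
            agent_parts ++ [PySem.Str.join " " current_text] else agent_parts,
         some "agent",
         if pvAgentText line ≠ "" then [pvAgentText line] else [])
      else
        if current_speaker ≠ none then
          (customer_parts, agent_parts, current_speaker, current_text ++ [line])
        else
          (customer_parts, agent_parts, some "customer", [line])

def parse_transcript_with_speakers (transcript_text : String) : List (String × String) :=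
  let lines := (PySem.Str.split? transcript_text "\n").getD []
  let st := lines.foldl pvStepA ([], [], none, [])
  let customer_parts := if st.2.2.1 = some "customer" ∧ st.2.2.2 ≠ [] then
      st.1 ++ [PySem.Str.join " " st.2.2.2] else st.1
  let agent_parts := if st.2.2.1 = some "agent" ∧ st.2.2.2 ≠ [] then
      st.2.1 ++ [PySem.Str.join " " st.2.2.2] else st.2.1
  [("customer_text", PySem.Str.strip (PySem.Str.join " " customer_parts)),
   ("agent_text", PySem.Str.strip (PySem.Str.join " " agent_parts))]

-- ===== PORT B =====
-- B's loop body: state = (customer_tokens, agent_tokens, speaker); no buffering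
def pvStepB (st : List String × List String × Option String) (rawLine : String) :
    List String × List String × Option String :=
  match st with
  | (customer_tokens, agent_tokens, speaker) =>
    let line := PySem.Str.strip rawLine
    if line = "" then (customer_tokens, agent_tokens, speaker)
    else
      let low := PySem.Str.lower line
      if pvIsCust line low then
        (if pvCustText line ≠ "" then customer_tokens ++ [pvCustText line] else customer_tokens,
         agent_tokens, some "customer")
      else if pvIsAgent line low then
        (customer_tokens,
         if pvAgentText line ≠ "" then agent_tokens ++ [pvAgentText line] else agent_tokens,
         some "agent")
      else if speaker = some "agent" then
        (customer_tokens, agent_tokens ++ [line], speaker)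
      else
        (customer_tokens ++ [line], agent_tokens, some "customer")

def parse_transcript_with_speakers_alt (transcript_text : String) : List (String × String) :=
  let st := ((PySem.Str.split? transcript_text "\n").getD []).foldl pvStepB ([], [], none)
  [("customer_text", PySem.Str.strip (PySem.Str.join " " st.1)),
   ("agent_text", PySem.Str.strip (PySem.Str.join " " st.2.1))]

-- ===== PRECONDITION & SPEC =====
def Spec_parse_transcript_with_speakers (transcript_text : String) (out : List (String × String)) : Prop := out = parse_transcript_with_speakers_alt transcript_text
instance (transcript_text : String) (out : List (String × String)) : Decidable (Spec_parse_transcript_with_speakers transcript_text out) := by unfold Spec_parse_transcript_with_speakers; infer_instance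

-- ===== CLAIM (what is proved, stated in full; the proofs are below) =====
def Claim_equal_parse_transcript_with_speakers : Prop := ∀ (transcript_text : String), Dom_parse_transcript_with_speakers transcript_text → Spec_parse_transcript_with_speakers transcript_text (parse_transcript_with_speakers transcript_text)

-- ===== LEMMAS AND PROOFS =====

-- ' '.join of the list of strings xs
def pvJ (xs : List String) : String := PySem.Str.join " " xs

-- join over a trailing singleton, on the Chars side
theorem pvChars_join_cons {sep : List Char} (a : List Char) {l : List (List Char)} (hl : l ≠ []) :
    PySem.Chars.join sep (a :: l) = a ++ sep ++ PySem.Chars.join sep l := by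
  cases l with
  | nil => exact absurd rfl hl
  | cons b rest => exact PySem.Chars.join_cons_cons sep a b rest

theorem pvChars_join_append_singleton (sep : List Char) (xs : List (List Char)) (t : List Char) :
    PySem.Chars.join sep (xs ++ [t]) =
      if xs = [] then t else PySem.Chars.join sep xs ++ sep ++ t := by
  induction xs with
  | nil => simp [PySem.Chars.join_singleton]
  | cons a xs ih =>
    rw [List.cons_append, pvChars_join_cons a (by simp), ih]
    by_cases h : xs = []
    · subst h; simp [PySem.Chars.join_singleton]
    · rw [if_neg h, if_neg (by simp), pvChars_join_cons a h]; simp [List.append_assoc]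

theorem pvChars_join_flush (sep : List Char) (xs ys : List (List Char)) (hy : ys ≠ []) :
    PySem.Chars.join sep (xs ++ [PySem.Chars.join sep ys]) = PySem.Chars.join sep (xs ++ ys) := by
  induction xs with
  | nil => simp [PySem.Chars.join_singleton]
  | cons a xs ih =>
    rw [List.cons_append, List.cons_append,
        pvChars_join_cons a (by simp), pvChars_join_cons a (by simp [hy]), ih]

-- the two String-level facts the invariant steps need
theorem pvJ_congr_append {xs ys : List String} (t : String)
    (h : pvJ xs = pvJ ys) (he : xs = [] ↔ ys = []) : pvJ (xs ++ [t]) = pvJ (ys ++ [t]) := by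
  apply String.toList_inj.mp
  have h' : (pvJ xs).toList = (pvJ ys).toList := by rw [h]
  simp only [pvJ, PySem.Str.toList_join] at h' ⊢
  rw [List.map_append, List.map_append, List.map_singleton,
      pvChars_join_append_singleton, pvChars_join_append_singleton, h']
  by_cases hx : xs = []
  · rw [if_pos (by simp [hx]), if_pos (by simp [he.mp hx])]
  · have hy : ys ≠ [] := fun hy => hx (he.mpr hy)
    rw [if_neg (by simp [hx]), if_neg (by simp [hy])]

theorem pvJ_flush (xs : List String) {ys : List String} (hy : ys ≠ []) :
    pvJ (xs ++ [pvJ ys]) = pvJ (xs ++ ys) := by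
  apply String.toList_inj.mp
  simp only [pvJ, PySem.Str.toList_join]
  rw [List.map_append, List.map_append, List.map_singleton, PySem.Str.toList_join]
  exact pvChars_join_flush _ _ _ (by simpa using hy)

-- appending an optional (possibly empty) new token on both sides of a join equality
theorem pvJ_opt_append {c x : List String} (t : String)
    (h : pvJ c = pvJ x) (he : c = [] ↔ x = []) :
    pvJ (if t ≠ "" then c ++ [t] else c) = pvJ (x ++ if t ≠ "" then [t] else []) ∧
    ((if t ≠ "" then c ++ [t] else c) = [] ↔ x = [] ∧ (if t ≠ "" then [t] else []) = []) := by
  by_cases ht : t = ""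
  · simp [ht, h, he]
  · simp only [ne_eq, ht, not_false_eq_true, if_pos]
    exact ⟨pvJ_congr_append t h he, by simp⟩

-- flushing A's buffer into its parts list preserves the joined value
theorem pvFlush_self {cp ct c : List String}
    (h : pvJ c = pvJ (cp ++ ct)) (he : c = [] ↔ cp = [] ∧ ct = []) :
    pvJ c = pvJ (if ct ≠ [] then cp ++ [pvJ ct] else cp) ∧
    (c = [] ↔ (if ct ≠ [] then cp ++ [pvJ ct] else cp) = []) := by
  by_cases hct : ct = []
  · subst hct; simp at h he; simp [h, he]
  · simp only [ne_eq, hct, not_false_eq_true, if_pos]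
    rw [pvJ_flush cp hct]
    exact ⟨h, by simp [he, hct]⟩

-- the buffered text of A's state that belongs to speaker `who`
def pvPend (sp : Option String) (who : String) (ct : List String) : List String :=
  if sp = some who then ct else []

-- the loop invariant between A's state and B's state
def pvInv (a : List String × List String × Option String × List String)
    (b : List String × List String × Option String) : Prop :=
  b.2.2 = a.2.2.1 ∧
  (a.2.2.1 = none ∨ a.2.2.1 = some "customer" ∨ a.2.2.1 = some "agent") ∧
  pvJ b.1 = pvJ (a.1 ++ pvPend a.2.2.1 "customer" a.2.2.2) ∧
  (b.1 = [] ↔ a.1 = [] ∧ pvPend a.2.2.1 "customer" a.2.2.2 = []) ∧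
  pvJ b.2.1 = pvJ (a.2.1 ++ pvPend a.2.2.1 "agent" a.2.2.2) ∧
  (b.2.1 = [] ↔ a.2.1 = [] ∧ pvPend a.2.2.1 "agent" a.2.2.2 = [])

theorem pvJ_def : PySem.Str.join " " = pvJ := rfl

theorem pvInv_step (a : List String × List String × Option String × List String)
    (b : List String × List String × Option String) (l : String)
    (h : pvInv a b) : pvInv (pvStepA a l) (pvStepB b l) := by
  obtain ⟨cp, ap, sp, ct⟩ := a
  obtain ⟨c, g, spb⟩ := b
  obtain ⟨hsp, hmem, hc, hce, hg, hge⟩ := h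
  simp only at hsp hc hce hg hge hmem
  subst hsp
  simp only [pvStepA, pvStepB, pvJ_def]
  generalize PySem.Str.strip l = line
  by_cases h0 : line = ""
  · simp only [if_pos h0]; exact ⟨rfl, hmem, hc, hce, hg, hge⟩
  simp only [if_neg h0]
  generalize PySem.Str.lower line = low
  by_cases h1 : pvIsCust line low = true
  · simp only [if_pos h1]
    generalize pvCustText line = t
    rcases hmem with hsp | hsp | hsp <;> subst hsp
    · obtain ⟨q1, q2⟩ := pvJ_opt_append t (by simpa [pvPend] using hc) (by simpa [pvPend] using hce)
      exact ⟨rfl, by simp, by simpa [pvPend] using q1, by simpa [pvPend] using q2,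
             by simpa [pvPend] using hg, by simpa [pvPend] using hge⟩
    · obtain ⟨hf1, hf2⟩ := pvFlush_self (by simpa [pvPend] using hc) (by simpa [pvPend] using hce)
      obtain ⟨q1, q2⟩ := pvJ_opt_append t hf1 hf2
      exact ⟨rfl, by simp, by simpa [pvPend] using q1, by simpa [pvPend] using q2,
             by simpa [pvPend] using hg, by simpa [pvPend] using hge⟩
    · obtain ⟨q1, q2⟩ := pvJ_opt_append t (by simpa [pvPend] using hc) (by simpa [pvPend] using hce)
      obtain ⟨hf1, hf2⟩ := pvFlush_self (by simpa [pvPend] using hg) (by simpa [pvPend] using hge)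
      exact ⟨rfl, by simp, by simpa [pvPend] using q1, by simpa [pvPend] using q2,
             by simpa [pvPend] using hf1, by simpa [pvPend] using hf2⟩
  simp only [if_neg h1]
  by_cases h2 : pvIsAgent line low = true
  · simp only [if_pos h2]
    generalize pvAgentText line = t
    rcases hmem with hsp | hsp | hsp <;> subst hsp
    · obtain ⟨q1, q2⟩ := pvJ_opt_append t (by simpa [pvPend] using hg) (by simpa [pvPend] using hge)
      exact ⟨rfl, by simp, by simpa [pvPend] using hc, by simpa [pvPend] using hce,
             by simpa [pvPend] using q1, by simpa [pvPend] using q2⟩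
    · obtain ⟨hf1, hf2⟩ := pvFlush_self (by simpa [pvPend] using hc) (by simpa [pvPend] using hce)
      obtain ⟨q1, q2⟩ := pvJ_opt_append t (by simpa [pvPend] using hg) (by simpa [pvPend] using hge)
      exact ⟨rfl, by simp, by simpa [pvPend] using hf1, by simpa [pvPend] using hf2,
             by simpa [pvPend] using q1, by simpa [pvPend] using q2⟩
    · obtain ⟨hf1, hf2⟩ := pvFlush_self (by simpa [pvPend] using hg) (by simpa [pvPend] using hge)
      obtain ⟨q1, q2⟩ := pvJ_opt_append t hf1 hf2
      exact ⟨rfl, by simp, by simpa [pvPend] using hc, by simpa [pvPend] using hce,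
             by simpa [pvPend] using q1, by simpa [pvPend] using q2⟩
  simp only [if_neg h2]
  rcases hmem with hsp | hsp | hsp <;> subst hsp
  · -- no speaker yet: both default to customer
    rw [if_neg (by simp), if_neg (by simp)]
    have q1 := pvJ_congr_append line (show pvJ c = pvJ cp by simpa [pvPend] using hc)
      (by simpa [pvPend] using hce)
    exact ⟨rfl, by simp, by simpa [pvPend] using q1, by simp [pvPend],
           by simpa [pvPend] using hg, by simpa [pvPend] using hge⟩
  · -- continuation of customer
    rw [if_pos (by simp), if_neg (by simp)]
    have q1 := pvJ_congr_append line (show pvJ c = pvJ (cp ++ ct) by simpa [pvPend] using hc)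
      (by simpa [pvPend] using hce)
    exact ⟨rfl, by simp, by simpa [pvPend, List.append_assoc] using q1, by simp [pvPend],
           by simpa [pvPend] using hg, by simpa [pvPend] using hge⟩
  · -- continuation of agent
    rw [if_pos (by simp), if_pos rfl]
    have q1 := pvJ_congr_append line (show pvJ g = pvJ (ap ++ ct) by simpa [pvPend] using hg)
      (by simpa [pvPend] using hge)
    exact ⟨rfl, by simp, by simpa [pvPend] using hc, by simpa [pvPend] using hce,
           by simpa [pvPend, List.append_assoc] using q1, by simp [pvPend]⟩

theorem pvInv_foldl (lines : List String)
    (a : List String × List String × Option String × List String)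
    (b : List String × List String × Option String) (h : pvInv a b) :
    pvInv (lines.foldl pvStepA a) (lines.foldl pvStepB b) := by
  induction lines generalizing a b with
  | nil => exact h
  | cons l ls ih => exact ih _ _ (pvInv_step a b l h)

-- A's end-of-loop flush joins to the same string as B's flat token list
theorem pvFinal {cp ct c : List String} {sp : Option String} {who : String}
    (h : pvJ c = pvJ (cp ++ pvPend sp who ct)) :
    pvJ (if sp = some who ∧ ct ≠ [] then cp ++ [pvJ ct] else cp) = pvJ c := by
  by_cases hs : sp = some who
  · by_cases hct : ct = []
    · simp [pvPend, hs, hct] at h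
      simp [hct, h]
    · rw [if_pos ⟨hs, hct⟩, pvJ_flush cp hct]
      simp only [pvPend, if_pos hs] at h
      rw [h]
  · rw [if_neg (by tauto)]
    simp [pvPend, hs] at h
    rw [h]

-- ===== VERDICT (by name: the statement is the Claim_ definition above) =====
theorem parse_transcript_with_speakers_spec : Claim_equal_parse_transcript_with_speakers := by
  intro transcript_text _
  unfold Spec_parse_transcript_with_speakers parse_transcript_with_speakers parse_transcript_with_speakers_alt
  simp only [pvJ_def]
  have hinv := pvInv_foldl ((PySem.Str.split? transcript_text "\n").getD [])
    ([], [], none, []) ([], [], none) (by simp [pvInv, pvPend, pvJ])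
  generalize hA : List.foldl pvStepA ([], [], none, []) ((PySem.Str.split? transcript_text "\n").getD []) = sa at hinv ⊢
  generalize hB : List.foldl pvStepB ([], [], none) ((PySem.Str.split? transcript_text "\n").getD []) = sb at hinv ⊢
  obtain ⟨cp, ap, sp, ct⟩ := sa
  obtain ⟨c, g, spb⟩ := sb
  obtain ⟨hsp, hmem, hc, hce, hg, hge⟩ := hinv
  simp only at hsp hc hg ⊢
  rw [pvFinal hc, pvFinal hg]
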